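-- pv_equiv track=rewrite | github.com/KingHyoman/CodingTest | Programmers/babypro_1.py | solution_
-- ===== SOURCE A (Python) =====
-- def solution_(babbling):
--     answer = 0
--     bit = {'aya': 0, 'ye': 0, 'woo': 0, 'ma': 0}
--     for bab in babbling:
--         stack = ''
--         for i in bit.keys():
--             bit[i] = 0
--         for i in bab:
--             stack += i
--             if stack == 'aya' or stack == 'ye' or stack == 'woo' or stack == 'ma':
--                 if bit[stack] == 1:
--                     continue
--                 else:
--                     for i in bit.keys():
--                         bit[i] = 0
--                     bit[stack] = 1
--                     stack = ''
--         if not stack: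
--             answer += 1
--
--     return answer
-- ===== SOURCE B (Python) =====
-- def solution_(babbling):
--     def speakable(b):
--         prev = ''
--         while b:
--             for w in ('aya', 'ye', 'woo', 'ma'):
--                 if w != prev and b.startswith(w):
--                     prev = w
--                     b = b[len(w):]
--                     break
--             else:
--                 return False
--         return True
--     return sum(1 for b in babbling if speakable(b))
-- ===== Notes on version B (the rewrite author's own statement) =====
-- stated objective: simpler
-- what changed: Replaces the char-by-char stack accumulator with a mutable last-word dict by a word-at-a-time greedy tokenizer: repeatedly strip a leading allowed word different from the previous one via startswith, counting with a sum over a boolean predicate.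
import Mathlib
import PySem

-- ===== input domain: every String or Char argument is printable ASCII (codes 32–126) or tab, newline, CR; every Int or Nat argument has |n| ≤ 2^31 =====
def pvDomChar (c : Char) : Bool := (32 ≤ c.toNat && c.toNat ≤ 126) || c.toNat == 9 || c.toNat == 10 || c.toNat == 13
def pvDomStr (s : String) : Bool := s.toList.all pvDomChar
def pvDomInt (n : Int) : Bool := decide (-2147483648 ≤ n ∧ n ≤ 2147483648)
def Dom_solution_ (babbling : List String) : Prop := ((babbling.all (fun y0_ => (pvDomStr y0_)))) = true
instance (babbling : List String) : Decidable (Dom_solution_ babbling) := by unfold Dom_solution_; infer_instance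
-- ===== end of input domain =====

-- B replaces A's char-by-char stack parse (with a last-word dict) by a word-at-a-time
-- greedy tokenizer (strip a leading allowed word ≠ previous); objective: simpler.


-- ===== PORT A =====
-- strings handled as List Char (exact: Python str is a sequence of chars)
def pvA : List Char := ['a', 'y', 'a']
def pvY : List Char := ['y', 'e']
def pvW : List Char := ['w', 'o', 'o']
def pvM : List Char := ['m', 'a']

-- 'for i in bit.keys(): bit[i] = 0'
def pvZero (bit : PySem.Dict (List Char) Int) : PySem.Dict (List Char) Int :=
  (PySem.Dict.keys bit).foldl (fun b k => b.insert k 0) bit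

-- the inner 'for i in bab' loop; state (stack, bit); returns both at loop end
def pvInner : List Char → List Char → PySem.Dict (List Char) Int →
    List Char × PySem.Dict (List Char) Int
  | [], stack, bit => (stack, bit)
  | c :: rest, stack, bit =>
    let stack' := stack ++ [c]
    if stack' = pvA ∨ stack' = pvY ∨ stack' = pvW ∨ stack' = pvM then
      -- 'bit[stack]' : key is present (stack' is one of the four keys), so getD is exact
      if bit.getD stack' 0 = 1 then pvInner rest stack' bit
      else pvInner rest [] ((pvZero bit).insert stack' 1)
    else pvInner rest stack' bit

def pvBit0 : PySem.Dict (List Char) Int :=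
  PySem.Dict.ofList [(pvA, 0), (pvY, 0), (pvW, 0), (pvM, 0)]

def solution_ (babbling : List String) : Int :=
  (babbling.foldl
    (fun (acc : Int × PySem.Dict (List Char) Int) bab =>
      let bit := pvZero acc.2
      let r := pvInner bab.toList [] bit
      (if r.1 = [] then acc.1 + 1 else acc.1, r.2))
    ((0 : Int), pvBit0)).1

-- ===== PORT B =====
-- while b: for w in ('aya','ye','woo','ma'): if w != prev and b.startswith(w): strip w; else return False
-- (b[len(w):] with len(w) ≥ 0 is List.drop, exact)
def pvSpeak (b prev : List Char) : Bool :=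
  if _hb : b = [] then true
  else if pvA ≠ prev ∧ PySem.Chars.startswith b pvA = true then pvSpeak (b.drop 3) pvA
  else if pvY ≠ prev ∧ PySem.Chars.startswith b pvY = true then pvSpeak (b.drop 2) pvY
  else if pvW ≠ prev ∧ PySem.Chars.startswith b pvW = true then pvSpeak (b.drop 3) pvW
  else if pvM ≠ prev ∧ PySem.Chars.startswith b pvM = true then pvSpeak (b.drop 2) pvM
  else false
termination_by b.length
decreasing_by
  all_goals
    simp only [List.length_drop]
    have : 0 < b.length := List.length_pos_iff.mpr _hb
    omega

def solution__alt (babbling : List String) : Int :=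
  babbling.foldl (fun acc b => if pvSpeak b.toList [] then acc + 1 else acc) 0

-- ===== PRECONDITION & SPEC =====
def Spec_solution_ (babbling : List String) (out : Int) : Prop := out = solution__alt babbling
instance (babbling : List String) (out : Int) : Decidable (Spec_solution_ babbling out) := by unfold Spec_solution_; infer_instance

-- ===== CLAIM (what is proved, stated in full; the proofs are below) =====
def Claim_equal_solution_ : Prop := ∀ (babbling : List String), Dom_solution_ babbling → Spec_solution_ babbling (solution_ babbling)

-- ===== LEMMAS AND PROOFS =====

-- the four dicts with one word marked
def pvDA : PySem.Dict (List Char) Int := pvBit0.insert pvA 1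
def pvDY : PySem.Dict (List Char) Int := pvBit0.insert pvY 1
def pvDW : PySem.Dict (List Char) Int := pvBit0.insert pvW 1
def pvDM : PySem.Dict (List Char) Int := pvBit0.insert pvM 1

-- the dicts reachable by A's loop
def pvInS (d : PySem.Dict (List Char) Int) : Prop :=
  d = pvBit0 ∨ d = pvDA ∨ d = pvDY ∨ d = pvDW ∨ d = pvDM

-- pairing of B's `prev` with A's dict state
def pvPD (prev : List Char) (d : PySem.Dict (List Char) Int) : Prop :=
  (prev = [] ∧ d = pvBit0) ∨ (prev = pvA ∧ d = pvDA) ∨ (prev = pvY ∧ d = pvDY) ∨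
  (prev = pvW ∧ d = pvDW) ∨ (prev = pvM ∧ d = pvDM)

-- a stack that can never again become equal to a word (it is no proper prefix of any word)
def pvDead (stack : List Char) : Prop :=
  stack ≠ [] ∧ (stack <+: pvA → stack = pvA) ∧ (stack <+: pvY → stack = pvY) ∧
  (stack <+: pvW → stack = pvW) ∧ (stack <+: pvM → stack = pvM)

theorem pvDead_of_three (stack : List Char) (h : 3 ≤ stack.length) (hne : stack ≠ []) :
    pvDead stack := by
  refine ⟨hne, ?_, ?_, ?_, ?_⟩ <;> intro hp <;>
    have hl := hp.length_le <;> simp [pvA, pvY, pvW, pvM] at hl <;>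
    exact hp.eq_of_length (by simpa [pvA, pvY, pvW, pvM] using le_antisymm hl (by omega))

theorem pvDead_append (stack : List Char) (c : Char) (h : pvDead stack) :
    pvDead (stack ++ [c]) := by
  obtain ⟨hne, h1, h2, h3, h4⟩ := h
  refine ⟨by simp, ?_, ?_, ?_, ?_⟩ <;> intro hp
  · have := h1 ((stack.prefix_append [c]).trans hp)
    subst this; have := hp.length_le; simp [pvA] at this
  · have := h2 ((stack.prefix_append [c]).trans hp)
    subst this; have := hp.length_le; simp [pvY] at this
  · have := h3 ((stack.prefix_append [c]).trans hp)
    subst this; have := hp.length_le; simp [pvW] at this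
  · have := h4 ((stack.prefix_append [c]).trans hp)
    subst this; have := hp.length_le; simp [pvM] at this

theorem pvDead_not_word (stack : List Char) (c : Char) (h : pvDead stack) :
    ¬ (stack ++ [c] = pvA ∨ stack ++ [c] = pvY ∨ stack ++ [c] = pvW ∨ stack ++ [c] = pvM) := by
  obtain ⟨hne, h1, h2, h3, h4⟩ := h
  rintro (hw | hw | hw | hw)
  · have := h1 (hw ▸ stack.prefix_append [c]); rw [← hw] at this; simp at this
  · have := h2 (hw ▸ stack.prefix_append [c]); rw [← hw] at this; simp at this
  · have := h3 (hw ▸ stack.prefix_append [c]); rw [← hw] at this; simp at this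
  · have := h4 (hw ▸ stack.prefix_append [c]); rw [← hw] at this; simp at this

-- once dead, the stack never empties again
theorem pvDead_run (l : List Char) : ∀ stack bit, pvDead stack → (pvInner l stack bit).1 ≠ [] := by
  induction l with
  | nil => intro stack bit h; exact h.1
  | cons c rest ih =>
    intro stack bit h
    simp only [pvInner, if_neg (pvDead_not_word stack c h)]
    exact ih _ _ (pvDead_append stack c h)

theorem pvInS_inner (l : List Char) : ∀ stack d, pvInS d → pvInS (pvInner l stack d).2 := by
  induction l with
  | nil => intro stack d h; exact h
  | cons c rest ih =>
    intro stack d h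
    simp only [pvInner]
    split
    · rename_i hw
      split
      · exact ih _ _ h
      · rcases h with h | h | h | h | h <;> subst h <;>
          rcases hw with hw | hw | hw | hw <;> rw [hw] <;>
          exact ih _ _ (by unfold pvInS; decide)
    · exact ih _ _ h


theorem pvPD_facts (prev : List Char) (d : PySem.Dict (List Char) Int) (h : pvPD prev d) :
    pvZero d = pvBit0 ∧
    (d.getD pvA 0 = 1 ↔ prev = pvA) ∧ (d.getD pvY 0 = 1 ↔ prev = pvY) ∧
    (d.getD pvW 0 = 1 ↔ prev = pvW) ∧ (d.getD pvM 0 = 1 ↔ prev = pvM) := by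
  rcases h with ⟨h1, h2⟩ | ⟨h1, h2⟩ | ⟨h1, h2⟩ | ⟨h1, h2⟩ | ⟨h1, h2⟩ <;> subst h1 <;> subst h2 <;>
    exact ⟨by decide, by decide, by decide, by decide, by decide⟩

-- B returns False when every word is either not a prefix or equal to prev
theorem pvSpeak_false (l prev : List Char) (h : l ≠ [])
    (hA : pvA <+: l → prev = pvA) (hY : pvY <+: l → prev = pvY)
    (hW : pvW <+: l → prev = pvW) (hM : pvM <+: l → prev = pvM) :
    pvSpeak l prev = false := by
  have nA : ¬(pvA ≠ prev ∧ PySem.Chars.startswith l pvA = true) :=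
    fun ⟨hne, hp⟩ => hne (hA (((PySem.Chars.startswith_iff _ _).mp hp))).symm
  have nY : ¬(pvY ≠ prev ∧ PySem.Chars.startswith l pvY = true) :=
    fun ⟨hne, hp⟩ => hne (hY (((PySem.Chars.startswith_iff _ _).mp hp))).symm
  have nW : ¬(pvW ≠ prev ∧ PySem.Chars.startswith l pvW = true) :=
    fun ⟨hne, hp⟩ => hne (hW (((PySem.Chars.startswith_iff _ _).mp hp))).symm
  have nM : ¬(pvM ≠ prev ∧ PySem.Chars.startswith l pvM = true) :=
    fun ⟨hne, hp⟩ => hne (hM (((PySem.Chars.startswith_iff _ _).mp hp))).symm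
  rw [pvSpeak]
  simp [h, nA, nY, nW, nM]

-- B strips a leading word
theorem pvSpeak_step_A (t prev : List Char) (h : ¬ prev = pvA) :
    pvSpeak (pvA ++ t) prev = pvSpeak t pvA := by
  have hs : PySem.Chars.startswith (pvA ++ t) pvA = true :=
    (PySem.Chars.startswith_iff _ _).mpr ⟨t, rfl⟩
  rw [pvSpeak, dif_neg (by simp [pvA]), if_pos ⟨fun hh => h hh.symm, hs⟩]
  simp [pvA]

theorem pvSpeak_step_Y (t prev : List Char) (h : ¬ prev = pvY) :
    pvSpeak (pvY ++ t) prev = pvSpeak t pvY := by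
  have hs : PySem.Chars.startswith (pvY ++ t) pvY = true :=
    (PySem.Chars.startswith_iff _ _).mpr ⟨t, rfl⟩
  have nA : ¬(pvA ≠ prev ∧ PySem.Chars.startswith (pvY ++ t) pvA = true) := by
    rintro ⟨-, hp⟩
    have := (PySem.Chars.startswith_iff _ _).mp hp
    simp [pvA, pvY, List.cons_prefix_cons] at this
  rw [pvSpeak, dif_neg (by simp [pvY]), if_neg nA, if_pos ⟨fun hh => h hh.symm, hs⟩]
  simp [pvY]

theorem pvSpeak_step_W (t prev : List Char) (h : ¬ prev = pvW) :
    pvSpeak (pvW ++ t) prev = pvSpeak t pvW := by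
  have hs : PySem.Chars.startswith (pvW ++ t) pvW = true :=
    (PySem.Chars.startswith_iff _ _).mpr ⟨t, rfl⟩
  have nA : ¬(pvA ≠ prev ∧ PySem.Chars.startswith (pvW ++ t) pvA = true) := by
    rintro ⟨-, hp⟩
    have := (PySem.Chars.startswith_iff _ _).mp hp
    simp [pvA, pvW, List.cons_prefix_cons] at this
  have nY : ¬(pvY ≠ prev ∧ PySem.Chars.startswith (pvW ++ t) pvY = true) := by
    rintro ⟨-, hp⟩
    have := (PySem.Chars.startswith_iff _ _).mp hp
    simp [pvY, pvW, List.cons_prefix_cons] at this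
  rw [pvSpeak, dif_neg (by simp [pvW]), if_neg nA, if_neg nY, if_pos ⟨fun hh => h hh.symm, hs⟩]
  simp [pvW]

theorem pvSpeak_step_M (t prev : List Char) (h : ¬ prev = pvM) :
    pvSpeak (pvM ++ t) prev = pvSpeak t pvM := by
  have hs : PySem.Chars.startswith (pvM ++ t) pvM = true :=
    (PySem.Chars.startswith_iff _ _).mpr ⟨t, rfl⟩
  have nA : ¬(pvA ≠ prev ∧ PySem.Chars.startswith (pvM ++ t) pvA = true) := by
    rintro ⟨-, hp⟩
    have := (PySem.Chars.startswith_iff _ _).mp hp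
    simp [pvA, pvM, List.cons_prefix_cons] at this
  have nY : ¬(pvY ≠ prev ∧ PySem.Chars.startswith (pvM ++ t) pvY = true) := by
    rintro ⟨-, hp⟩
    have := (PySem.Chars.startswith_iff _ _).mp hp
    simp [pvY, pvM, List.cons_prefix_cons] at this
  have nW : ¬(pvW ≠ prev ∧ PySem.Chars.startswith (pvM ++ t) pvW = true) := by
    rintro ⟨-, hp⟩
    have := (PySem.Chars.startswith_iff _ _).mp hp
    simp [pvW, pvM, List.cons_prefix_cons] at this
  rw [pvSpeak, dif_neg (by simp [pvM]), if_neg nA, if_neg nY, if_neg nW,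
    if_pos ⟨fun hh => h hh.symm, hs⟩]
  simp [pvM]

-- A consumes a leading word whose bit is 0
theorem pvInner_word_A (t : List Char) (d : PySem.Dict (List Char) Int)
    (h : ¬ d.getD pvA 0 = 1) :
    pvInner (pvA ++ t) [] d = pvInner t [] ((pvZero d).insert pvA 1) := by
  have h' : ¬ d.getD ['a', 'y', 'a'] 0 = 1 := by simpa [pvA] using h
  simp [pvInner, pvA, pvY, pvW, pvM, h']

theorem pvInner_word_Y (t : List Char) (d : PySem.Dict (List Char) Int)
    (h : ¬ d.getD pvY 0 = 1) :
    pvInner (pvY ++ t) [] d = pvInner t [] ((pvZero d).insert pvY 1) := by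
  have h' : ¬ d.getD ['y', 'e'] 0 = 1 := by simpa [pvY] using h
  simp [pvInner, pvA, pvY, pvW, pvM, h']

theorem pvInner_word_W (t : List Char) (d : PySem.Dict (List Char) Int)
    (h : ¬ d.getD pvW 0 = 1) :
    pvInner (pvW ++ t) [] d = pvInner t [] ((pvZero d).insert pvW 1) := by
  have h' : ¬ d.getD ['w', 'o', 'o'] 0 = 1 := by simpa [pvW] using h
  simp [pvInner, pvA, pvY, pvW, pvM, h']

theorem pvInner_word_M (t : List Char) (d : PySem.Dict (List Char) Int)
    (h : ¬ d.getD pvM 0 = 1) :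
    pvInner (pvM ++ t) [] d = pvInner t [] ((pvZero d).insert pvM 1) := by
  have h' : ¬ d.getD ['m', 'a'] 0 = 1 := by simpa [pvM] using h
  simp [pvInner, pvA, pvY, pvW, pvM, h']

-- A hits 'continue' on a repeated word: the stack never empties again
theorem pvInner_dead_A (t : List Char) (d : PySem.Dict (List Char) Int)
    (h : d.getD pvA 0 = 1) : (pvInner (pvA ++ t) [] d).1 ≠ [] := by
  have h' : d.getD ['a', 'y', 'a'] 0 = 1 := by simpa [pvA] using h
  simp only [pvInner, pvA, pvY, pvW, pvM, List.cons_append, List.nil_append]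
  simp [h']
  exact pvDead_run t ['a', 'y', 'a'] d (by unfold pvDead pvA pvY pvW pvM; decide)

theorem pvInner_dead_Y (t : List Char) (d : PySem.Dict (List Char) Int)
    (h : d.getD pvY 0 = 1) : (pvInner (pvY ++ t) [] d).1 ≠ [] := by
  have h' : d.getD ['y', 'e'] 0 = 1 := by simpa [pvY] using h
  simp only [pvInner, pvA, pvY, pvW, pvM, List.cons_append, List.nil_append]
  simp [h']
  exact pvDead_run t ['y', 'e'] d (by unfold pvDead pvA pvY pvW pvM; decide)

theorem pvInner_dead_W (t : List Char) (d : PySem.Dict (List Char) Int)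
    (h : d.getD pvW 0 = 1) : (pvInner (pvW ++ t) [] d).1 ≠ [] := by
  have h' : d.getD ['w', 'o', 'o'] 0 = 1 := by simpa [pvW] using h
  simp only [pvInner, pvA, pvY, pvW, pvM, List.cons_append, List.nil_append]
  simp [h']
  exact pvDead_run t ['w', 'o', 'o'] d (by unfold pvDead pvA pvY pvW pvM; decide)

theorem pvInner_dead_M (t : List Char) (d : PySem.Dict (List Char) Int)
    (h : d.getD pvM 0 = 1) : (pvInner (pvM ++ t) [] d).1 ≠ [] := by
  have h' : d.getD ['m', 'a'] 0 = 1 := by simpa [pvM] using h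
  simp only [pvInner, pvA, pvY, pvW, pvM, List.cons_append, List.nil_append]
  simp [h']
  exact pvDead_run t ['m', 'a'] d (by unfold pvDead pvA pvY pvW pvM; decide)

-- no word is a prefix: A's stack goes dead
theorem pvInner_no_word (l : List Char) (d : PySem.Dict (List Char) Int) (hne : l ≠ [])
    (hA : ¬ pvA <+: l) (hY : ¬ pvY <+: l) (hW : ¬ pvW <+: l) (hM : ¬ pvM <+: l) :
    (pvInner l [] d).1 ≠ [] := by
  match l with
  | [c] => simp [pvInner, pvA, pvY, pvW, pvM]
  | [c1, c2] =>
    have nY : ¬ (c1 = 'y' ∧ c2 = 'e') := fun ⟨h1, h2⟩ => hY (by subst h1; subst h2; simp [pvY])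
    have nM : ¬ (c1 = 'm' ∧ c2 = 'a') := fun ⟨h1, h2⟩ => hM (by subst h1; subst h2; simp [pvM])
    simp [pvInner, pvA, pvY, pvW, pvM, nY, nM]
  | c1 :: c2 :: c3 :: t =>
    have nY : ¬ (c1 = 'y' ∧ c2 = 'e') := fun ⟨h1, h2⟩ =>
      hY (by subst h1; subst h2; simp [pvY, List.cons_prefix_cons])
    have nM : ¬ (c1 = 'm' ∧ c2 = 'a') := fun ⟨h1, h2⟩ =>
      hM (by subst h1; subst h2; simp [pvM, List.cons_prefix_cons])
    have nA : ¬ (c1 = 'a' ∧ c2 = 'y' ∧ c3 = 'a') := fun ⟨h1, h2, h3⟩ =>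
      hA (by subst h1; subst h2; subst h3; simp [pvA, List.cons_prefix_cons])
    have nW : ¬ (c1 = 'w' ∧ c2 = 'o' ∧ c3 = 'o') := fun ⟨h1, h2, h3⟩ =>
      hW (by subst h1; subst h2; subst h3; simp [pvW, List.cons_prefix_cons])
    simp only [pvInner, pvA, pvY, pvW, pvM, List.nil_append, List.append_assoc, List.cons_append,
      List.cons.injEq, and_true, and_false, false_and, or_false, false_or, if_false]
    rw [if_neg (by simp [nY, nM]), if_neg (by simp [nY, nM]), if_neg (by simp [nA, nW])]
    exact pvDead_run t [c1, c2, c3] d (pvDead_of_three _ (by simp) (by simp))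

-- the core per-string equivalence
theorem pvMain : ∀ (n : Nat) (l prev : List Char) (d : PySem.Dict (List Char) Int),
    l.length ≤ n → pvPD prev d → ((pvInner l [] d).1 = [] ↔ pvSpeak l prev = true) := by
  intro n
  induction n with
  | zero =>
    intro l prev d hl _
    have : l = [] := by simpa using List.length_eq_zero_iff.mp (Nat.le_zero.mp hl)
    subst this
    simp [pvInner, pvSpeak]
  | succ n ih =>
    intro l prev d hl hpd
    obtain ⟨hz, gA, gY, gW, gM⟩ := pvPD_facts prev d hpd
    rcases l with _ | ⟨c, t0⟩
    · simp [pvInner, pvSpeak]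
    · by_cases hA : pvA <+: (c :: t0)
      · obtain ⟨t, ht⟩ := hA
        rw [← ht]
        have hlen : t.length ≤ n := by
          have := congrArg List.length ht; simp [pvA] at this; simp at hl; omega
        by_cases hp : prev = pvA
        · have h1 := pvInner_dead_A t d (gA.mpr hp)
          have h2 := pvSpeak_false (pvA ++ t) prev (by simp [pvA]) (fun _ => hp)
            (by rw [pvA, pvY]; intro hpp; simp [List.cons_prefix_cons] at hpp)
            (by rw [pvA, pvW]; intro hpp; simp [List.cons_prefix_cons] at hpp)
            (by rw [pvA, pvM]; intro hpp; simp [List.cons_prefix_cons] at hpp)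
          simp [h1, h2]
        · rw [pvInner_word_A t d (fun h => hp (gA.mp h)), hz, pvSpeak_step_A t prev hp]
          exact ih t pvA pvDA hlen (Or.inr (Or.inl ⟨rfl, rfl⟩))
      · by_cases hY : pvY <+: (c :: t0)
        · obtain ⟨t, ht⟩ := hY
          rw [← ht]
          have hlen : t.length ≤ n := by
            have := congrArg List.length ht; simp [pvY] at this; simp at hl; omega
          by_cases hp : prev = pvY
          · have h1 := pvInner_dead_Y t d (gY.mpr hp)
            have h2 := pvSpeak_false (pvY ++ t) prev (by simp [pvY])
              (by rw [pvY, pvA]; intro hpp; simp [List.cons_prefix_cons] at hpp)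
              (fun _ => hp)
              (by rw [pvY, pvW]; intro hpp; simp [List.cons_prefix_cons] at hpp)
              (by rw [pvY, pvM]; intro hpp; simp [List.cons_prefix_cons] at hpp)
            simp [h1, h2]
          · rw [pvInner_word_Y t d (fun h => hp (gY.mp h)), hz, pvSpeak_step_Y t prev hp]
            exact ih t pvY pvDY hlen (Or.inr (Or.inr (Or.inl ⟨rfl, rfl⟩)))
        · by_cases hW : pvW <+: (c :: t0)
          · obtain ⟨t, ht⟩ := hW
            rw [← ht]
            have hlen : t.length ≤ n := by
              have := congrArg List.length ht; simp [pvW] at this; simp at hl; omega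
            by_cases hp : prev = pvW
            · have h1 := pvInner_dead_W t d (gW.mpr hp)
              have h2 := pvSpeak_false (pvW ++ t) prev (by simp [pvW])
                (by rw [pvW, pvA]; intro hpp; simp [List.cons_prefix_cons] at hpp)
                (by rw [pvW, pvY]; intro hpp; simp [List.cons_prefix_cons] at hpp)
                (fun _ => hp)
                (by rw [pvW, pvM]; intro hpp; simp [List.cons_prefix_cons] at hpp)
              simp [h1, h2]
            · rw [pvInner_word_W t d (fun h => hp (gW.mp h)), hz, pvSpeak_step_W t prev hp]
              exact ih t pvW pvDW hlen (Or.inr (Or.inr (Or.inr (Or.inl ⟨rfl, rfl⟩))))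
          · by_cases hM : pvM <+: (c :: t0)
            · obtain ⟨t, ht⟩ := hM
              rw [← ht]
              have hlen : t.length ≤ n := by
                have := congrArg List.length ht; simp [pvM] at this; simp at hl; omega
              by_cases hp : prev = pvM
              · have h1 := pvInner_dead_M t d (gM.mpr hp)
                have h2 := pvSpeak_false (pvM ++ t) prev (by simp [pvM])
                  (by rw [pvM, pvA]; intro hpp; simp [List.cons_prefix_cons] at hpp)
                  (by rw [pvM, pvY]; intro hpp; simp [List.cons_prefix_cons] at hpp)
                  (by rw [pvM, pvW]; intro hpp; simp [List.cons_prefix_cons] at hpp)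
                  (fun _ => hp)
                simp [h1, h2]
              · rw [pvInner_word_M t d (fun h => hp (gM.mp h)), hz, pvSpeak_step_M t prev hp]
                exact ih t pvM pvDM hlen (Or.inr (Or.inr (Or.inr (Or.inr ⟨rfl, rfl⟩))))
            · have h1 := pvInner_no_word (c :: t0) d (by simp) hA hY hW hM
              have h2 := pvSpeak_false (c :: t0) prev (by simp)
                (fun hpp => absurd hpp hA) (fun hpp => absurd hpp hY)
                (fun hpp => absurd hpp hW) (fun hpp => absurd hpp hM)
              simp [h1, h2]

-- outer fold equivalence
theorem pvOuter (bs : List String) : ∀ (ans : Int) d, pvInS d →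
    (bs.foldl (fun (acc : Int × PySem.Dict (List Char) Int) bab =>
        let bit := pvZero acc.2
        let r := pvInner bab.toList [] bit
        (if r.1 = [] then acc.1 + 1 else acc.1, r.2)) (ans, d)).1
      = bs.foldl (fun acc b => if pvSpeak b.toList [] then acc + 1 else acc) ans := by
  induction bs with
  | nil => intro ans d _; rfl
  | cons b rest ih =>
    intro ans d hd
    have hz : pvZero d = pvBit0 := by
      rcases hd with h | h | h | h | h <;> subst h <;> decide
    simp only [List.foldl_cons, hz]
    rw [ih _ _ (pvInS_inner b.toList [] pvBit0 (Or.inl rfl))]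
    congr 1
    have := pvMain b.toList.length b.toList [] pvBit0 le_rfl (Or.inl ⟨rfl, rfl⟩)
    by_cases hs : pvSpeak b.toList [] = true
    · simp [hs, this.mpr hs]
    · simp only [Bool.not_eq_true] at hs
      have hne : ¬(pvInner b.toList [] pvBit0).1 = [] := fun h => by simpa [hs] using this.mp h
      simp [hs, hne]

-- ===== VERDICT (by name: the statement is the Claim_ definition above) =====
theorem solution__spec : Claim_equal_solution_ := by
  intro babbling _
  unfold Spec_solution_ solution_ solution__alt
  exact pvOuter babbling 0 pvBit0 (Or.inl rfl)
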